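-- pv_equiv track=rewrite | github.com/FCARRILLOM/2D_BinPackingProblem | bin_packing_genetic.py | CalcSpaceWasted
-- ===== SOURCE A (Python) =====
-- def CalcSpaceWasted(width, height, objects):
--     spaceWasted = 0
--     widthLeft = width
--     for obj in objects:
--         spaceWasted += obj[0] * (height - obj[1])
--         widthLeft -= obj[0]
--     spaceWasted += widthLeft * height
--     return spaceWasted
-- ===== SOURCE B (Python) =====
-- def CalcSpaceWasted(width, height, objects):
--     return width * height - sum(w * h for w, h in objects)
-- ===== Notes on version B (the rewrite author's own statement) =====
-- stated objective: simpler
-- what changed: Replaces the per-object wasted-space accumulation with a running widthLeft by the closed form: total bin area minus the sum of occupied rectangle areas.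
import Mathlib
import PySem

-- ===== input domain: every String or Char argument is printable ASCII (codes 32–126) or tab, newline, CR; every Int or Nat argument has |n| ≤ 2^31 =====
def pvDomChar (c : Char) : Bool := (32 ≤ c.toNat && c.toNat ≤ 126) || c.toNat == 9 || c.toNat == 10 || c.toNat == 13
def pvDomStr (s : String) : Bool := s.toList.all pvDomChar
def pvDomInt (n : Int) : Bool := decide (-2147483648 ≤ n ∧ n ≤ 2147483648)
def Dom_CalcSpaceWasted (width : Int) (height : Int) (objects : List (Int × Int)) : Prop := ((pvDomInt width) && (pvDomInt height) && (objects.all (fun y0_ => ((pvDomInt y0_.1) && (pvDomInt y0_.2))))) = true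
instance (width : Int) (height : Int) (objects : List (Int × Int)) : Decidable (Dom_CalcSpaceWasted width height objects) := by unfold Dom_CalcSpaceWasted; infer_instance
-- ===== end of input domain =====

-- B replaces A's running widthLeft / per-object accumulation by the closed form
-- width*height - Σ obj.1*obj.2 (exact for the integer inputs covered here); objective: simpler.

-- ===== PORT A =====
def CalcSpaceWasted (width : Int) (height : Int) (objects : List (Int × Int)) : Int :=
  let st := objects.foldl
    (fun (acc : Int × Int) obj => (acc.1 + obj.1 * (height - obj.2), acc.2 - obj.1))
    (0, width)
  st.1 + st.2 * height

-- ===== PORT B =====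
def CalcSpaceWasted_alt (width : Int) (height : Int) (objects : List (Int × Int)) : Int :=
  width * height - (objects.map (fun obj => obj.1 * obj.2)).sum

-- ===== PRECONDITION & SPEC =====
def Spec_CalcSpaceWasted (width : Int) (height : Int) (objects : List (Int × Int)) (out : Int) : Prop := out = CalcSpaceWasted_alt width height objects
instance (width : Int) (height : Int) (objects : List (Int × Int)) (out : Int) : Decidable (Spec_CalcSpaceWasted width height objects out) := by unfold Spec_CalcSpaceWasted; infer_instance

-- ===== CLAIM (what is proved, stated in full; the proofs are below) =====
def Claim_equal_CalcSpaceWasted : Prop := ∀ (width : Int) (height : Int) (objects : List (Int × Int)), Dom_CalcSpaceWasted width height objects → Spec_CalcSpaceWasted width height objects (CalcSpaceWasted width height objects)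

-- ===== LEMMAS AND PROOFS =====

-- Invariant of A's fold: starting from any accumulator (s, w).
theorem CalcSpaceWasted_fold (height : Int) (objects : List (Int × Int)) :
    ∀ (s w : Int),
      (objects.foldl
        (fun (acc : Int × Int) obj => (acc.1 + obj.1 * (height - obj.2), acc.2 - obj.1))
        (s, w))
      = (s + (objects.map (fun obj => obj.1 * (height - obj.2))).sum,
         w - (objects.map (fun obj => obj.1)).sum) := by
  induction objects with
  | nil => intro s w; simp
  | cons o rest ih =>
      intro s w
      simp [List.foldl, ih]
      constructor <;> ring

-- Σ a*(h-b) = h*Σa - Σ a*b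
theorem sum_map_waste (height : Int) (objects : List (Int × Int)) :
    (objects.map (fun obj => obj.1 * (height - obj.2))).sum
      = height * (objects.map (fun obj => obj.1)).sum
        - (objects.map (fun obj => obj.1 * obj.2)).sum := by
  induction objects with
  | nil => simp
  | cons o rest ih => simp [ih]; ring

-- ===== VERDICT (by name: the statement is the Claim_ definition above) =====
theorem CalcSpaceWasted_spec : Claim_equal_CalcSpaceWasted := by
  intro width height objects _
  unfold Spec_CalcSpaceWasted CalcSpaceWasted CalcSpaceWasted_alt
  rw [CalcSpaceWasted_fold]
  simp [sum_map_waste, sub_mul]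
  ring
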